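-- pv_equiv track=rewrite | github.com/nithinkasi27/ADK | agents/terraform_agent.py | sanitize_module_hcl
-- ===== SOURCE A (Python) =====
-- FORBIDDEN_TOKENS = (
--     "project_id",
--     "var.project_id",
--     "region",
--     "var.region",
-- )
--
-- def sanitize_module_hcl(hcl: str) -> str:
--     """
--     Removes provider blocks, terraform blocks,
--     and ANY reference to project_id / region.
--     """
--     lines = hcl.splitlines()
--     cleaned = []
--     skip = False
--
--     for line in lines:
--         s = line.strip()
--
--         # Remove terraform/provider blocks
--         if s.startswith("terraform") or s.startswith("provider "):
--             skip = True
--             continue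
--
--         if skip:
--             if s == "}":
--                 skip = False
--             continue
--
--         # Drop forbidden tokens completely
--         if any(tok in s for tok in FORBIDDEN_TOKENS):
--             continue
--
--         cleaned.append(line)
--
--     return "\n".join(cleaned).strip()
-- ===== SOURCE B (Python) =====
-- def _skip_block(lines, i):
--     # return the index just past the block's closing bare '}' (or past the end)
--     while i < len(lines) and lines[i].strip() != "}":
--         i += 1
--     return i + 1
--
--
-- def sanitize_module_hcl(hcl: str) -> str:
--     """
--     Removes provider blocks, terraform blocks,
--     and ANY reference to project_id / region.
--     """
--     lines = hcl.splitlines()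
--     kept = []
--     i = 0
--     while i < len(lines):
--         s = lines[i].strip()
--         if s.startswith("terraform") or s.startswith("provider "):
--             i = _skip_block(lines, i + 1)
--         elif "project_id" in s or "region" in s:
--             i += 1
--         else:
--             kept.append(lines[i])
--             i += 1
--     return "\n".join(kept).strip()
-- ===== Notes on version B (the rewrite author's own statement) =====
-- stated objective: simpler
-- what changed: Replaces A's fused single loop with a skip flag by an index walk that delegates block skipping to a helper that jumps past the closing brace line, and tests only the two maximal forbidden tokens (project_id, region) since the var.-prefixed ones contain them as substrings.
import Mathlib
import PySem

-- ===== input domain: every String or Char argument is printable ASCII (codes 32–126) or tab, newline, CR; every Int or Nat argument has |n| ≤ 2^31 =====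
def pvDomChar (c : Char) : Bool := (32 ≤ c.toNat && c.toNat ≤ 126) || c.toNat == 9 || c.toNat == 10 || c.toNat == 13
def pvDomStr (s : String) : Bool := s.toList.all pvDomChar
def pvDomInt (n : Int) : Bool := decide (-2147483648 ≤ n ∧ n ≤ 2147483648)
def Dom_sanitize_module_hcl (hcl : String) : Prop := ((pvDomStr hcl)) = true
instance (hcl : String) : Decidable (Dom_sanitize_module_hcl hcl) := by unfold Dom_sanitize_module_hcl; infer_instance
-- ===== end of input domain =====

-- B replaces A's fused skip-flag loop by an index walk that jumps past each
-- terraform/provider block with a helper, and checks only the two maximal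
-- forbidden tokens; objective: simpler.

-- ===== PORT A =====
def pvForbidden : List String := ["project_id", "var.project_id", "region", "var.region"]

def pvAloop : List String → Bool → List String → List String
  | [], _, cleaned => cleaned
  | line :: rest, skip, cleaned =>
    let s := PySem.Str.strip line
    if PySem.Str.startswith s "terraform" || PySem.Str.startswith s "provider " then
      pvAloop rest true cleaned
    else if skip then
      if s == "}" then pvAloop rest false cleaned else pvAloop rest true cleaned
    else if pvForbidden.any (fun t => PySem.Str.isIn t s) then
      pvAloop rest skip cleaned
    else
      pvAloop rest skip (cleaned ++ [line])

def sanitize_module_hcl (hcl : String) : String :=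
  PySem.Str.strip (PySem.Str.join "\n" (pvAloop (PySem.Str.splitlines hcl) false []))

-- ===== PORT B =====
-- _skip_block: advance past the first line stripping to "}" (or past the end)
def pvSkipBlock : List String → List String
  | [] => []
  | l :: rest => if PySem.Str.strip l == "}" then rest else pvSkipBlock rest

theorem pvSkipBlock_length_le : ∀ (xs : List String), (pvSkipBlock xs).length ≤ xs.length := by
  intro xs
  induction xs with
  | nil => simp [pvSkipBlock]
  | cons l rest ih =>
    simp only [pvSkipBlock]
    split
    · simp
    · exact Nat.le_succ_of_le ih

def pvBloop : List String → List String
  | [] => []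
  | l :: rest =>
    let s := PySem.Str.strip l
    if PySem.Str.startswith s "terraform" || PySem.Str.startswith s "provider " then
      pvBloop (pvSkipBlock rest)
    else if PySem.Str.isIn "project_id" s || PySem.Str.isIn "region" s then
      pvBloop rest
    else
      l :: pvBloop rest
termination_by xs => xs.length
decreasing_by
  · exact Nat.lt_succ_of_le (pvSkipBlock_length_le rest)
  · simp
  · simp

def sanitize_module_hcl_alt (hcl : String) : String :=
  PySem.Str.strip (PySem.Str.join "\n" (pvBloop (PySem.Str.splitlines hcl)))

-- ===== PRECONDITION & SPEC =====
def Spec_sanitize_module_hcl (hcl : String) (out : String) : Prop := out = sanitize_module_hcl_alt hcl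
instance (hcl : String) (out : String) : Decidable (Spec_sanitize_module_hcl hcl out) := by unfold Spec_sanitize_module_hcl; infer_instance

-- ===== CLAIM (what is proved, stated in full; the proofs are below) =====
def Claim_equal_sanitize_module_hcl : Prop := ∀ (hcl : String), Dom_sanitize_module_hcl hcl → Spec_sanitize_module_hcl hcl (sanitize_module_hcl hcl)

-- ===== LEMMAS AND PROOFS =====

-- "project_id" resp. "region" occurs inside the var.-qualified tokens
theorem pv_sub_pid (s : String) (h : PySem.Str.isIn "var.project_id" s = true) :
    PySem.Str.isIn "project_id" s = true := by
  rw [PySem.Str.isIn_iff_infix] at h ⊢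
  exact List.IsInfix.trans (by decide) h

theorem pv_sub_region (s : String) (h : PySem.Str.isIn "var.region" s = true) :
    PySem.Str.isIn "region" s = true := by
  rw [PySem.Str.isIn_iff_infix] at h ⊢
  exact List.IsInfix.trans (by decide) h

theorem pv_cond_eq (s : String) :
    (pvForbidden.any (fun t => PySem.Str.isIn t s)) =
      (PySem.Str.isIn "project_id" s || PySem.Str.isIn "region" s) := by
  simp only [pvForbidden, List.any_cons, List.any_nil, Bool.or_false]
  cases h1 : PySem.Str.isIn "project_id" s with
  | true => simp
  | false =>
    cases h2 : PySem.Str.isIn "region" s with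
    | true => simp
    | false =>
      have h3 : PySem.Str.isIn "var.project_id" s = false := by
        cases h : PySem.Str.isIn "var.project_id" s
        · rfl
        · rw [pv_sub_pid s h] at h1; exact absurd h1 (by simp)
      have h4 : PySem.Str.isIn "var.region" s = false := by
        cases h : PySem.Str.isIn "var.region" s
        · rfl
        · rw [pv_sub_region s h] at h2; exact absurd h2 (by simp)
      simp only [h3, h4]
      decide

-- a line stripping to "}" starts with neither "terraform" nor "provider "
theorem pv_brace_not_header (l : String) (h : PySem.Str.strip l = "}") :
    (PySem.Str.startswith (PySem.Str.strip l) "terraform" ||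
     PySem.Str.startswith (PySem.Str.strip l) "provider ") = false := by
  rw [h]; decide

-- A's loop in skip mode equals A's loop resumed in normal mode after pvSkipBlock
theorem pvAloop_skip : ∀ (lines : List String) (acc : List String),
    pvAloop lines true acc = pvAloop (pvSkipBlock lines) false acc := by
  intro lines
  induction lines with
  | nil => intro acc; simp [pvAloop, pvSkipBlock]
  | cons l rest ih =>
    intro acc
    by_cases hb : (PySem.Str.startswith (PySem.Str.strip l) "terraform" ||
                   PySem.Str.startswith (PySem.Str.strip l) "provider ") = true
    · have hne : ¬ (PySem.Str.strip l == "}") = true := by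
        intro he
        rw [pv_brace_not_header l (by simpa using he)] at hb
        exact absurd hb (by simp)
      simp only [pvAloop, pvSkipBlock, hb, if_true, if_neg hne]
      exact ih acc
    · by_cases he : (PySem.Str.strip l == "}") = true
      · simp only [pvAloop, pvSkipBlock, hb, he]
        simp
      · simp only [pvAloop, pvSkipBlock, hb, he]
        exact ih acc

-- main invariant: A's loop from skip=false accumulates exactly B's output
theorem pv_main : ∀ (n : Nat) (lines acc : List String), lines.length ≤ n →
    pvAloop lines false acc = acc ++ pvBloop lines := by
  intro n
  induction n with
  | zero =>
    intro lines acc h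
    have : lines = [] := List.eq_nil_of_length_eq_zero (Nat.le_zero.mp h)
    subst this; simp [pvAloop, pvBloop]
  | succ n ih =>
    intro lines acc h
    cases lines with
    | nil => simp [pvAloop, pvBloop]
    | cons l rest =>
      by_cases hb : (PySem.Str.startswith (PySem.Str.strip l) "terraform" ||
                     PySem.Str.startswith (PySem.Str.strip l) "provider ") = true
      · simp only [pvAloop, pvBloop, hb, if_true]
        rw [pvAloop_skip rest acc]
        exact ih _ acc (le_trans (pvSkipBlock_length_le rest)
          (Nat.le_of_succ_le_succ (by simpa using h)))
      · by_cases hf : (pvForbidden.any (fun t => PySem.Str.isIn t (PySem.Str.strip l))) = true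
        · have hf' : (PySem.Str.isIn "project_id" (PySem.Str.strip l) ||
                      PySem.Str.isIn "region" (PySem.Str.strip l)) = true := by
            rw [← pv_cond_eq]; exact hf
          simp only [pvAloop, pvBloop, hb, hf, hf']
          exact ih rest acc (Nat.le_of_succ_le_succ (by simpa using h))
        · have hf' : (PySem.Str.isIn "project_id" (PySem.Str.strip l) ||
                      PySem.Str.isIn "region" (PySem.Str.strip l)) = false := by
            rw [← pv_cond_eq]; simpa using hf
          simp only [pvAloop, pvBloop, hb, hf, hf']
          rw [ih rest (acc ++ [l]) (Nat.le_of_succ_le_succ (by simpa using h))]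
          simp

-- ===== VERDICT (by name: the statement is the Claim_ definition above) =====
theorem sanitize_module_hcl_spec : Claim_equal_sanitize_module_hcl := by
  intro hcl _
  unfold Spec_sanitize_module_hcl sanitize_module_hcl sanitize_module_hcl_alt
  rw [pv_main (PySem.Str.splitlines hcl).length _ [] (le_refl _)]
  simp
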